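-- pv_equiv track=rewrite | github.com/huangweijing/weo_leetcode | 1625_Lexicographically_Smallest_String_After_Applying_Operations.py | min_num
-- ===== SOURCE A (Python) =====
-- def min_num(num: int, a: int) -> list[int]:
--     ret = [num, 0]
--     cur = num
--     dup_set = set[int]()
--     cnt = 0
--     while cur not in dup_set:
--         dup_set.add(cur)
--         if cur < ret[0]:
--             ret = [cur, cnt]
--         cur = (cur + a) % 10
--         cnt += 1
--     return ret
-- ===== SOURCE B (Python) =====
-- def _gcd10(a10: int) -> int:
--     # gcd(a10, 10) for a10 in [0, 10), by cases over the divisors of 10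
--     if a10 == 0:
--         return 10
--     elif a10 == 5:
--         return 5
--     elif a10 % 2 == 0:
--         return 2
--     else:
--         return 1
--
--
-- def _min_num_a10(num: int, a10: int) -> list[int]:
--     g = _gcd10(a10)
--     # values reachable after >= 1 steps are exactly the residues r in [0,10)
--     # with r == num (mod g); the smallest is num % g
--     m = num % g
--     if num <= m:
--         return [num, 0]
--     # first index of m: smallest positive k with k*a10 == m - num (mod 10)
--     n = 10 // g
--     d = ((m - num) % 10) // g
--     k = (d * pow(a10 // g, -1, n)) % n
--     if k == 0:
--         k = n
--     return [m, k]
--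
--
-- def min_num(num: int, a: int) -> list[int]:
--     # Closed form instead of orbit simulation: reduce the step to a % 10 and
--     # solve the congruence directly (see _min_num_a10).
--     return _min_num_a10(num, a % 10)
-- ===== Notes on version B (the rewrite author's own statement) =====
-- stated objective: alternative
-- what changed: B replaces A's orbit-walking simulation (while-loop with a seen-set and running min) by a number-theoretic closed form: the reachable residues are those congruent to num mod g = gcd(a,10), so the minimum is min(num, num % g) and its first index is computed by solving k*a = (num%g - num) (mod 10) with a modular inverse instead of iterating.
import Mathlib
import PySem

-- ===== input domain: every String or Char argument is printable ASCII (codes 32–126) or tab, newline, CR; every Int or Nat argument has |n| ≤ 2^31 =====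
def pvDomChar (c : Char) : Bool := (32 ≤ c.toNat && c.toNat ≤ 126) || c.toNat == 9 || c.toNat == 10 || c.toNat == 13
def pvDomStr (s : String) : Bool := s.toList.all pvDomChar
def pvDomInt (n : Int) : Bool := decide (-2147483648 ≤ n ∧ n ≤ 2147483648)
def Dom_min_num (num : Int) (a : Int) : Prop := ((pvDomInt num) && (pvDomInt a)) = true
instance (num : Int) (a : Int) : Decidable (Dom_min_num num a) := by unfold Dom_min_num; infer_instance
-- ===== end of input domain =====

-- B replaces A's orbit-walking simulation by a closed form: minimum = min(num, num % gcd(a,10)),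
-- first index by solving a linear congruence mod 10 (alternative algorithm, no loop).

-- ===== PORT A =====
-- A's 'ret' is always the two-element list [r0, r1]; it is carried as the two Ints r0, r1.
-- The loop visits at most 11 distinct values (after the first step cur ∈ [0,10)), so the
-- fuel 12 is a pure totality guard; on exhaustion the current ret is returned.
def minNumLoop (a : Int) : Nat → Int → Int → Int → PySem.Set Int → Int → List Int
  | 0, r0, r1, _, _, _ => [r0, r1]
  | fuel+1, r0, r1, cur, seen, cnt =>
    if cur ∈ seen then [r0, r1]
    else
      let r := if cur < r0 then (cur, cnt) else (r0, r1)
      minNumLoop a fuel r.1 r.2 (PySem.Int.mod (cur + a) 10) (PySem.Set.add seen cur) (cnt + 1)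

def min_num (num : Int) (a : Int) : List Int :=
  minNumLoop a 12 num 0 num (PySem.Set.ofList []) 0

-- ===== PORT B =====
-- port of Source B's helper _gcd10
def gcd10 (a10 : Int) : Int :=
  if a10 = 0 then 10
  else if a10 = 5 then 5
  else if PySem.Int.mod a10 2 = 0 then 2
  else 1

-- port of Source B's 'pow(x, -1, n)': the unique modular inverse in [0, n) (Python's result),
-- found by search; exact whenever n ≥ 1 and gcd(x, n) = 1, which is the only way B calls it
def pyInvMod (x n : Int) : Int :=
  Int.ofNat (((List.range n.toNat).find?
    (fun k : Nat => decide (PySem.Int.mod (x * (k : Int)) n = PySem.Int.mod 1 n))).getD 0)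

-- port of Source B's helper _min_num_a10
def minNumA10 (num : Int) (a10 : Int) : List Int :=
  let g := gcd10 a10
  let m := PySem.Int.mod num g
  if num ≤ m then [num, 0]
  else
    let n := PySem.Int.floordiv 10 g
    let d := PySem.Int.floordiv (PySem.Int.mod (m - num) 10) g
    let k := PySem.Int.mod (d * pyInvMod (PySem.Int.floordiv a10 g) n) n
    if k = 0 then [m, n] else [m, k]

def min_num_alt (num : Int) (a : Int) : List Int :=
  minNumA10 num (PySem.Int.mod a 10)

-- ===== PRECONDITION & SPEC =====
def Spec_min_num (num : Int) (a : Int) (out : List Int) : Prop := out = min_num_alt num a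
instance (num : Int) (a : Int) (out : List Int) : Decidable (Spec_min_num num a out) := by unfold Spec_min_num; infer_instance

-- ===== CLAIM (what is proved, stated in full; the proofs are below) =====
def Claim_equal_min_num : Prop := ∀ (num : Int) (a : Int), Dom_min_num num a → Spec_min_num num a (min_num num a)

-- ===== LEMMAS AND PROOFS =====

-- one step of A's loop, the let projected away
theorem minNumLoop_succ (a : Int) (f : Nat) (r0 r1 cur cnt : Int) (seen : PySem.Set Int) :
    minNumLoop a (f+1) r0 r1 cur seen cnt =
      if cur ∈ seen then [r0, r1]
      else minNumLoop a f (if cur < r0 then cur else r0) (if cur < r0 then cnt else r1)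
        (PySem.Int.mod (cur + a) 10) (PySem.Set.add seen cur) (cnt + 1) := by
  rw [minNumLoop]
  by_cases h : cur ∈ seen
  · simp [h]
  · by_cases h2 : cur < r0 <;> simp [h, h2]

-- A's loop depends on the step a only through a % 10, and on the seen set only through
-- membership of values in [0,10), once the current value is a residue in [0,10).
theorem minNumLoop_congr (fuel : Nat) :
    ∀ (a₁ a₂ : Int), a₁ % 10 = a₂ % 10 →
    ∀ (cur r0 r1 cnt : Int) (seen₁ seen₂ : PySem.Set Int),
      0 ≤ cur → cur < 10 →
      (∀ x : Int, 0 ≤ x → x < 10 → (x ∈ seen₁ ↔ x ∈ seen₂)) →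
      minNumLoop a₁ fuel r0 r1 cur seen₁ cnt = minNumLoop a₂ fuel r0 r1 cur seen₂ cnt := by
  induction fuel with
  | zero => intros; rfl
  | succ f ih =>
    intro a₁ a₂ ha cur r0 r1 cnt seen₁ seen₂ h0 h10 hseen
    have hmem : (cur ∈ seen₁) ↔ (cur ∈ seen₂) := hseen cur h0 h10
    rw [minNumLoop_succ, minNumLoop_succ]
    by_cases h : cur ∈ seen₁
    · rw [if_pos h, if_pos (hmem.mp h)]
    · rw [if_neg h, if_neg (fun hc => h (hmem.mpr hc))]
      have hcur : PySem.Int.mod (cur + a₁) 10 = PySem.Int.mod (cur + a₂) 10 := by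
        rw [PySem.Int.mod_eq_emod_of_pos (by norm_num), PySem.Int.mod_eq_emod_of_pos (by norm_num)]
        omega
      have hnext0 : 0 ≤ PySem.Int.mod (cur + a₁) 10 := by
        rw [PySem.Int.mod_eq_emod_of_pos (by norm_num)]; omega
      have hnext10 : PySem.Int.mod (cur + a₁) 10 < 10 := by
        rw [PySem.Int.mod_eq_emod_of_pos (by norm_num)]; omega
      have hseen' : ∀ x : Int, 0 ≤ x → x < 10 →
          (x ∈ PySem.Set.add seen₁ cur ↔ x ∈ PySem.Set.add seen₂ cur) := by
        intro x hx0 hx10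
        rw [PySem.Set.mem_add, PySem.Set.mem_add, hseen x hx0 hx10]
      rw [ih a₁ a₂ ha _ _ _ _ _ _ hnext0 hnext10 hseen', hcur]

-- once the running minimum is negative, no residue ever replaces it
theorem minNumLoop_neg (a : Int) (fuel : Nat) :
    ∀ (r0 r1 cur cnt : Int) (seen : PySem.Set Int),
      r0 < 0 → 0 ≤ cur → minNumLoop a fuel r0 r1 cur seen cnt = [r0, r1] := by
  induction fuel with
  | zero => intros; rfl
  | succ f ih =>
    intro r0 r1 cur cnt seen hr0 hc
    rw [minNumLoop_succ]
    by_cases h : cur ∈ seen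
    · rw [if_pos h]
    · rw [if_neg h, if_neg (show ¬ cur < r0 by omega), if_neg (show ¬ cur < r0 by omega)]
      exact ih r0 r1 _ _ _ hr0 (by rw [PySem.Int.mod_eq_emod_of_pos (by norm_num)]; omega)

-- one unfolding of A's loop from the initial state
theorem min_num_step (num a : Int) :
    min_num num a =
      minNumLoop a 11 num 0 (PySem.Int.mod (num + a) 10) [num] 1 := by
  have h12 : min_num num a = minNumLoop a (11+1) num 0 num (PySem.Set.ofList []) 0 := rfl
  rw [h12, minNumLoop_succ]
  rw [if_neg (by simp [PySem.Set.ofList] : num ∉ PySem.Set.ofList ([] : List Int))]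
  rw [if_neg (lt_irrefl num), if_neg (lt_irrefl num)]
  rfl

theorem A_neg (num a : Int) (h : num < 0) : min_num num a = [num, 0] := by
  rw [min_num_step]
  exact minNumLoop_neg a 11 num 0 _ 1 [num] h
    (by rw [PySem.Int.mod_eq_emod_of_pos (by norm_num)]; omega)

theorem A_mod (num a : Int) : min_num num a = min_num num (a % 10) := by
  rw [min_num_step, min_num_step]
  have hv : PySem.Int.mod (num + a) 10 = PySem.Int.mod (num + a % 10) 10 := by
    rw [PySem.Int.mod_eq_emod_of_pos (by norm_num), PySem.Int.mod_eq_emod_of_pos (by norm_num)]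
    omega
  rw [hv]
  exact minNumLoop_congr 11 a (a % 10) (by omega) _ num 0 1 [num] [num]
    (by rw [PySem.Int.mod_eq_emod_of_pos (by norm_num)]; omega)
    (by rw [PySem.Int.mod_eq_emod_of_pos (by norm_num)]; omega)
    (fun _ _ _ => Iff.rfl)

-- two unfoldings of A's loop when the first residue is new and below the start
theorem min_num_step2 (num a : Int) (h10 : 10 ≤ num) :
    min_num num a =
      minNumLoop a 10 (PySem.Int.mod (num + a) 10) 1
        (PySem.Int.mod (PySem.Int.mod (num + a) 10 + a) 10) [num, PySem.Int.mod (num + a) 10] 2 := by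
  rw [min_num_step]
  set v1 := PySem.Int.mod (num + a) 10 with hv1def
  have hv1 : 0 ≤ v1 ∧ v1 < 10 := by
    rw [hv1def, PySem.Int.mod_eq_emod_of_pos (by norm_num)]
    constructor <;> omega
  have e : minNumLoop a 11 num 0 v1 [num] 1 = minNumLoop a (10+1) num 0 v1 [num] 1 := rfl
  rw [e, minNumLoop_succ]
  rw [if_neg (show v1 ∉ ([num] : List Int) by simp only [List.mem_singleton]; omega)]
  rw [if_pos (show v1 < num by omega), if_pos (show v1 < num by omega)]
  have hadd : PySem.Set.add ([num] : List Int) v1 = [num, v1] := by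
    simp [PySem.Set.add, PySem.Set.contains]
    omega
  rw [hadd]
  norm_num

-- for num ≥ 10 the behaviour depends on num only through num % 10
theorem A_hi (num a : Int) (h : 10 ≤ num) :
    min_num num a = min_num (num % 10 + 10) (a % 10) := by
  have hv1' : PySem.Int.mod (num % 10 + 10 + a % 10) 10 = PySem.Int.mod (num + a) 10 := by
    rw [PySem.Int.mod_eq_emod_of_pos (by norm_num), PySem.Int.mod_eq_emod_of_pos (by norm_num)]
    omega
  have hv2 : PySem.Int.mod (PySem.Int.mod (num + a) 10 + a % 10) 10 =
      PySem.Int.mod (PySem.Int.mod (num + a) 10 + a) 10 := by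
    rw [PySem.Int.mod_eq_emod_of_pos (by norm_num), PySem.Int.mod_eq_emod_of_pos (by norm_num),
        PySem.Int.mod_eq_emod_of_pos (by norm_num)]
    omega
  rw [min_num_step2 num a h, min_num_step2 (num % 10 + 10) (a % 10) (by omega), hv1', hv2]
  have hv3 : 0 ≤ PySem.Int.mod (PySem.Int.mod (num + a) 10 + a) 10 ∧
      PySem.Int.mod (PySem.Int.mod (num + a) 10 + a) 10 < 10 := by
    rw [PySem.Int.mod_eq_emod_of_pos (by norm_num)]
    constructor <;> omega
  exact minNumLoop_congr 10 a (a % 10) (by omega) _ _ 1 2 _ _ hv3.1 hv3.2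
    (by intro x hx0 hx10; simp only [List.mem_cons, List.not_mem_nil, or_false]; omega)

theorem gcd10_options (a10 : Int) :
    gcd10 a10 = 10 ∨ gcd10 a10 = 5 ∨ gcd10 a10 = 2 ∨ gcd10 a10 = 1 := by
  unfold gcd10; split_ifs <;> simp

theorem B_neg (num a : Int) (h : num < 0) : min_num_alt num a = [num, 0] := by
  simp only [min_num_alt, minNumA10]
  have hc : num ≤ PySem.Int.mod num (gcd10 (PySem.Int.mod a 10)) := by
    rcases gcd10_options (PySem.Int.mod a 10) with hg | hg | hg | hg <;>
      rw [hg, PySem.Int.mod_eq_emod_of_pos (by norm_num)] <;> omega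
  rw [if_pos hc]

theorem B_mod (num a : Int) : min_num_alt num a = min_num_alt num (a % 10) := by
  unfold min_num_alt
  have h : PySem.Int.mod a 10 = PySem.Int.mod (a % 10) 10 := by
    rw [PySem.Int.mod_eq_emod_of_pos (by norm_num), PySem.Int.mod_eq_emod_of_pos (by norm_num)]
    omega
  rw [h]

-- B's helper depends on a start ≥ 10 only through its residue mod 10
theorem minNumA10_hi (num num' a10 : Int) (h : 10 ≤ num) (h' : 10 ≤ num')
    (hmod : num % 10 = num' % 10) : minNumA10 num a10 = minNumA10 num' a10 := by
  simp only [minNumA10]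
  set g := gcd10 a10 with hgdef
  have hg := gcd10_options a10
  rw [← hgdef] at hg
  have hgpos : 0 < g := by rcases hg with h | h | h | h <;> omega
  have hgle : g ≤ 10 := by rcases hg with h | h | h | h <;> omega
  have hdvd : g ∣ 10 := by rcases hg with h | h | h | h <;> rw [h] <;> decide
  obtain ⟨t, ht⟩ := hdvd
  have hmP : PySem.Int.mod num g = PySem.Int.mod num' g := by
    rw [PySem.Int.mod_eq_emod_of_pos hgpos, PySem.Int.mod_eq_emod_of_pos hgpos]
    have e1 : num % g = num % 10 % g := (Int.emod_emod_of_dvd num ⟨t, ht⟩).symm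
    have e2 : num' % g = num' % 10 % g := (Int.emod_emod_of_dvd num' ⟨t, ht⟩).symm
    rw [e1, e2, hmod]
  rw [← hmP]
  set m := PySem.Int.mod num g with hmdef
  have hmrange : 0 ≤ m ∧ m < g := by
    rw [hmdef, PySem.Int.mod_eq_emod_of_pos hgpos]
    exact ⟨Int.emod_nonneg num (by omega), Int.emod_lt_of_pos num hgpos⟩
  rw [if_neg (show ¬ num ≤ m by omega), if_neg (show ¬ num' ≤ m by omega)]
  have hdP : PySem.Int.mod (m - num) 10 = PySem.Int.mod (m - num') 10 := by
    rw [PySem.Int.mod_eq_emod_of_pos (by norm_num), PySem.Int.mod_eq_emod_of_pos (by norm_num)]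
    omega
  rw [hdP]

theorem B_hi (num a : Int) (h : 10 ≤ num) :
    min_num_alt num a = min_num_alt (num % 10 + 10) (a % 10) := by
  rw [B_mod num a]
  unfold min_num_alt
  exact minNumA10_hi num (num % 10 + 10) _ h (by omega) (by omega)

-- the residue cases: both programs agree for every start in [0,20) and step in [0,10)
theorem small_cases (n0 a0 : Int) (hn0 : 0 ≤ n0) (hn1 : n0 < 10) (ha0 : 0 ≤ a0) (ha1 : a0 < 10) :
    min_num n0 a0 = min_num_alt n0 a0 ∧
    min_num (n0 + 10) a0 = min_num_alt (n0 + 10) a0 := by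
  interval_cases n0 <;> interval_cases a0 <;> exact ⟨by decide, by decide⟩

-- ===== VERDICT (by name: the statement is the Claim_ definition above) =====
theorem min_num_spec : Claim_equal_min_num := by
  intro num a _
  unfold Spec_min_num
  have hamod : 0 ≤ a % 10 ∧ a % 10 < 10 := by omega
  rcases lt_or_ge num 0 with hneg | hpos
  · rw [A_neg num a hneg, B_neg num a hneg]
  · rcases lt_or_ge num 10 with hlo | hhi
    · rw [A_mod num a, B_mod num a]
      exact (small_cases num (a % 10) hpos hlo hamod.1 hamod.2).1
    · rw [A_hi num a hhi, B_hi num a hhi]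
      have hn : 0 ≤ num % 10 ∧ num % 10 < 10 := by omega
      exact (small_cases (num % 10) (a % 10) hn.1 hn.2 hamod.1 hamod.2).2
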